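-- pv_equiv track=rewrite | github.com/dingwengit/Code_practice | Python/1d_array/work_schedule.py | set_string
-- ===== SOURCE A (Python) =====
-- def set_string(s, item):
--     res, idx = [], 0
--     for c in s:
--         if c == "?":
--             res.append(f"{item[idx]}")
--             idx += 1
--         else:
--             res.append(c)
--     return "".join(res)
-- ===== SOURCE B (Python) =====
-- def set_string(s, item):
--     parts = s.split("?")
--     pieces = [parts[0]]
--     for i, tail in enumerate(parts[1:]):
--         pieces.append(f"{item[i]}")
--         pieces.append(tail)
--     return "".join(pieces)
-- ===== Notes on version B (the rewrite author's own statement) =====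
-- stated objective: alternative
-- what changed: B splits the string on '?' once and interleaves the precomputed segments with the sequential items, instead of scanning character by character with a running index.
import Mathlib
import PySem

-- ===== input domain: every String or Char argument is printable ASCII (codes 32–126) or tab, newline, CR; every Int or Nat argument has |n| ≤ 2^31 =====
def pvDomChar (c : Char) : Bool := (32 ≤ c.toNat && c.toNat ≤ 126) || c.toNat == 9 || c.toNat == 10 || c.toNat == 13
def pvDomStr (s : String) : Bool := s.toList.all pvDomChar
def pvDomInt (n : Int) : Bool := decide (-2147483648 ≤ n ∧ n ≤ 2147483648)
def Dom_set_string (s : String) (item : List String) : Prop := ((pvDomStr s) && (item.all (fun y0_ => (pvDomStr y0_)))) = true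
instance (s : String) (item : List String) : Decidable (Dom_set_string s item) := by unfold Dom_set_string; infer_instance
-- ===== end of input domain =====

-- B splits the string on '?' once and interleaves the segments with the items, instead of a per-character scan with a running index; same return value wherever A returns.


-- ===== PORT A =====
-- per-character scan: res accumulates string pieces (as char lists), idx the running item index
def set_string (s : String) (item : List String) : String :=
  let fin := s.toList.foldl
    (fun (st : List (List Char) × Int) (c : Char) =>
      if c = '?' then
        (st.1 ++ [(PySem.List.pyGetD item st.2 "").toList], st.2 + 1)
      else
        (st.1 ++ [[c]], st.2))
    ([], 0)
  String.ofList (PySem.Chars.join [] fin.1)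

-- ===== PORT B =====
-- split on '?', then interleave items with the remaining segments
def set_string_alt (s : String) (item : List String) : String :=
  let parts := PySem.Chars.splitOn s.toList ['?']
  let pieces := (PySem.List.enumerate (PySem.List.slice parts (some 1) none) 0).foldl
    (fun (acc : List (List Char)) (p : Int × List Char) =>
      (acc ++ [(PySem.List.pyGetD item p.1 "").toList]) ++ [p.2])
    [PySem.List.pyGetD parts 0 []]
  String.ofList (PySem.Chars.join [] pieces)

-- ===== PRECONDITION & SPEC =====
-- Pre_ excludes exactly the inputs where Python A raises IndexError (more '?' than items); B raises there too.
def Pre_set_string (s : String) (item : List String) : Prop :=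
  s.toList.count '?' ≤ item.length
instance (s : String) (item : List String) : Decidable (Pre_set_string s item) := by
  unfold Pre_set_string; infer_instance
def pvWitness_set_string : String × List String := ("a?b c?!", ["x", "yz"])
def Spec_set_string (s : String) (item : List String) (out : String) : Prop := out = set_string_alt s item
instance (s : String) (item : List String) (out : String) : Decidable (Spec_set_string s item out) := by unfold Spec_set_string; infer_instance

-- ===== CLAIM (what is proved, stated in full; the proofs are below) =====
def Claim_equal_set_string : Prop := ∀ (s : String) (item : List String), Dom_set_string s item → Pre_set_string s item → Spec_set_string s item (set_string s item)

-- ===== LEMMAS AND PROOFS =====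

-- structural reference for single-char split
def mySplit : List Char → List (List Char)
  | [] => [[]]
  | c :: t =>
    if c = '?' then [] :: mySplit t
    else
      match mySplit t with
      | [] => [[c]]
      | p :: ps => (c :: p) :: ps

lemma mySplit_ne_nil (l : List Char) : mySplit l ≠ [] := by
  cases l with
  | nil => simp [mySplit]
  | cons c t =>
    simp only [mySplit]
    split_ifs with h
    · simp
    · cases mySplit t <;> simp

lemma splitOn_go_eq (fuel : Nat) (l cur : List Char) (acc : List (List Char))
    (h : l.length < fuel) :
    PySem.Chars.splitOn.go ['?'] fuel l cur acc =
      acc.reverse ++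
        (match mySplit l with
         | [] => []
         | p :: ps => (cur.reverse ++ p) :: ps) := by
  induction fuel generalizing l cur acc with
  | zero => omega
  | succ fuel ih =>
    cases l with
    | nil => simp [PySem.Chars.splitOn.go, mySplit]
    | cons c rest =>
      by_cases hc : c = '?'
      · subst hc
        have hp : List.isPrefixOf ['?'] ('?' :: rest) = true := by
          simp [List.isPrefixOf]
        simp only [PySem.Chars.splitOn.go, hp, if_pos]
        have hdrop : List.drop (['?'].length) ('?' :: rest) = rest := rfl
        rw [hdrop, ih rest [] ((cur.reverse) :: acc) (by simpa using Nat.lt_of_succ_lt_succ h)]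
        have := mySplit_ne_nil rest
        cases hms : mySplit rest with
        | nil => exact absurd hms this
        | cons q qs => simp [mySplit, hms]
      · have hp : List.isPrefixOf ['?'] (c :: rest) = false := by
          simp only [List.isPrefixOf, Bool.and_true, beq_eq_false_iff_ne, ne_eq]
          exact fun h => hc h.symm
        simp only [PySem.Chars.splitOn.go, hp, Bool.false_eq_true, if_false]
        rw [ih rest (c :: cur) acc (by simpa using Nat.lt_of_succ_lt_succ h)]
        have := mySplit_ne_nil rest
        cases hms : mySplit rest with
        | nil => exact absurd hms this
        | cons q qs => simp [mySplit, hc, hms]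

lemma splitOn_eq (l : List Char) : PySem.Chars.splitOn l ['?'] = mySplit l := by
  unfold PySem.Chars.splitOn
  rw [splitOn_go_eq (l.length + 1) l [] [] (Nat.lt_succ_self _)]
  cases hms : mySplit l with
  | nil => exact absurd hms (mySplit_ne_nil l)
  | cons p ps => simp

-- Chars.join with empty separator is flatten
lemma join_nil_flatten (ps : List (List Char)) : PySem.Chars.join [] ps = ps.flatten := by
  induction ps with
  | nil => simp [PySem.Chars.join, List.intercalate]
  | cons a t ih =>
    cases t with
    | nil => simp [PySem.Chars.join, List.intercalate]
    | cons b r =>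
      rw [PySem.Chars.join_cons_cons]
      simp only [List.flatten_cons]
      rw [ih]
      simp

-- item[i] at a nonnegative index is the head of the dropped list
lemma pyGetD_drop_headD {α : Type} [Inhabited α] (xs : List α) (i : Int) (d : α) (h : 0 ≤ i) :
    PySem.List.pyGetD xs i d = (xs.drop i.toNat).headD d := by
  obtain ⟨n, rfl⟩ := Int.eq_ofNat_of_zero_le h
  rw [PySem.List.pyGetD_natCast, Int.toNat_natCast]
  induction xs generalizing n with
  | nil => cases n <;> simp
  | cons a t ih =>
    cases n with
    | zero => simp
    | succ m => simpa using ih m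

-- A's pieces, consuming the items sequentially
def apieces (item : List String) : List Char → List String → List (List Char)
  | [], _ => []
  | c :: t, its =>
    if c = '?' then (its.headD "").toList :: apieces item t its.tail
    else [c] :: apieces item t its

lemma foldA (item : List String) (l : List Char) (res : List (List Char)) (idx : Int)
    (h : 0 ≤ idx) :
    (l.foldl
      (fun (st : List (List Char) × Int) (c : Char) =>
        if c = '?' then
          (st.1 ++ [(PySem.List.pyGetD item st.2 "").toList], st.2 + 1)
        else
          (st.1 ++ [[c]], st.2))
      (res, idx)).1 = res ++ apieces item l (item.drop idx.toNat) := by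
  induction l generalizing res idx with
  | nil => simp [apieces]
  | cons c t ih =>
    by_cases hc : c = '?'
    · subst hc
      rw [List.foldl_cons, if_pos rfl, ih _ _ (by omega)]
      rw [pyGetD_drop_headD item idx "" h]
      have hd : item.drop (idx + 1).toNat = (item.drop idx.toNat).tail := by
        rw [List.tail_drop]
        congr 1
        omega
      simp [apieces, hd]
    · rw [List.foldl_cons, if_neg hc, ih _ _ h]
      simp [apieces, hc]

-- B's pieces built by the enumerate loop
def bpieces (item : List String) : List (List Char) → Int → List (List Char)
  | [], _ => []
  | p :: ps, i => (PySem.List.pyGetD item i "").toList :: p :: bpieces item ps (i + 1)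

lemma foldB (item : List String) (ps : List (List Char)) (i : Int) (acc : List (List Char)) :
    (PySem.List.enumerate ps i).foldl
      (fun (acc : List (List Char)) (p : Int × List Char) =>
        (acc ++ [(PySem.List.pyGetD item p.1 "").toList]) ++ [p.2]) acc
    = acc ++ bpieces item ps i := by
  induction ps generalizing i acc with
  | nil => simp [PySem.List.enumerate_nil, bpieces]
  | cons p t ih =>
    rw [PySem.List.enumerate_cons]
    simp only [List.foldl_cons]
    rw [ih]
    simp [bpieces]

-- interleave segments with sequentially consumed items
def interleave : List (List Char) → List String → List Char
  | [], _ => []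
  | p :: ps, its => (its.headD "").toList ++ p ++ interleave ps its.tail

lemma bpieces_flatten (item : List String) (ps : List (List Char)) (i : Int) (h : 0 ≤ i) :
    (bpieces item ps i).flatten = interleave ps (item.drop i.toNat) := by
  induction ps generalizing i with
  | nil => simp [bpieces, interleave]
  | cons p t ih =>
    simp only [bpieces, List.flatten_cons, interleave]
    rw [pyGetD_drop_headD item i "" h, ih (i + 1) (by omega)]
    have hd : item.drop (i + 1).toNat = (item.drop i.toNat).tail := by
      rw [List.tail_drop]; congr 1; omega
    rw [hd]
    simp

lemma apieces_eq_split (item : List String) (l : List Char) (its : List String) :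
    (apieces item l its).flatten =
      (mySplit l).headD [] ++ interleave (mySplit l).tail its := by
  induction l generalizing its with
  | nil => simp [apieces, mySplit, interleave]
  | cons c t ih =>
    by_cases hc : c = '?'
    · subst hc
      simp only [apieces, mySplit]
      cases hms : mySplit t with
      | nil => exact absurd hms (mySplit_ne_nil t)
      | cons q qs =>
        have := ih its.tail
        rw [hms] at this
        simp only [List.headD_cons, List.tail_cons] at this ⊢
        simp [interleave, this]
    · simp only [apieces, if_neg hc, List.flatten_cons, mySplit]
      cases hms : mySplit t with
      | nil => exact absurd hms (mySplit_ne_nil t)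
      | cons q qs =>
        have := ih its
        rw [hms] at this
        simp only [List.headD_cons, List.tail_cons] at this ⊢
        simp [this]

-- ===== VERDICT (by name: the statement is the Claim_ definition above) =====
theorem set_string_spec : Claim_equal_set_string := by
  intro s item _ _
  unfold Spec_set_string set_string set_string_alt
  simp only []
  rw [foldA item s.toList [] 0 le_rfl]
  rw [splitOn_eq]
  cases hms : mySplit s.toList with
  | nil => exact absurd hms (mySplit_ne_nil s.toList)
  | cons p ps =>
    congr 1
    rw [join_nil_flatten, join_nil_flatten]
    have hslice : PySem.List.slice (p :: ps) (some 1) none = ps := by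
      rw [PySem.List.slice_from]
      · simp
      · omega
    rw [hslice, foldB]
    simp only [List.flatten_append, List.flatten_cons, List.flatten_nil, List.nil_append,
      List.append_nil, Int.toNat_zero, List.drop_zero]
    rw [bpieces_flatten item ps 0 le_rfl]
    simp only [Int.toNat_zero, List.drop_zero]
    have hp0 : PySem.List.pyGetD (p :: ps) (0 : Int) [] = p := by
      simp [pysem]
    have hmain := apieces_eq_split item s.toList item
    rw [hms] at hmain
    simp only [List.headD_cons, List.tail_cons] at hmain
    rw [hmain, hp0]
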